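-- pv_equiv track=rewrite | github.com/OoIIIIIIIIoO/cable_news_archive_analysis | file_parsing.py | isolateTimeSegment
-- ===== SOURCE A (Python) =====
-- def isolateTimeSegment(part, timeRange):
--
--     start_time = ''
--     end_time =''
--     ignoreChar1 = '>'
--     ignoreChar2 = ' '
--     ignoreChar3 = '-'
--     end = 0
--
--     if (part == 1):
--         tRange = timeRange[0]
--     else:
--         tRange = timeRange[1]
--
--     for char in tRange:
--         if char == '-':
--             end = 1
--         if(char != ignoreChar1 and char != ignoreChar2 and  char != ignoreChar3):
--             if(end == 0):
--                 start_time = start_time + char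
--             else:
--                 end_time = end_time + char
--     if part == 1:
--         return start_time
--     else:
--         return end_time
-- ===== SOURCE B (Python) =====
-- def isolateTimeSegment(part, timeRange):
--     tRange = timeRange[0] if part == 1 else timeRange[1]
--     before, _, after = tRange.partition('-')
--     seg = before if part == 1 else after
--     return ''.join(c for c in seg if c not in '>- ')
-- ===== Notes on version B (the rewrite author's own statement) =====
-- stated objective: simpler
-- what changed: Replaces the stateful character loop with a flag by a single partition on the first '-' followed by one filter of the ignore characters over the chosen side.
import Mathlib
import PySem

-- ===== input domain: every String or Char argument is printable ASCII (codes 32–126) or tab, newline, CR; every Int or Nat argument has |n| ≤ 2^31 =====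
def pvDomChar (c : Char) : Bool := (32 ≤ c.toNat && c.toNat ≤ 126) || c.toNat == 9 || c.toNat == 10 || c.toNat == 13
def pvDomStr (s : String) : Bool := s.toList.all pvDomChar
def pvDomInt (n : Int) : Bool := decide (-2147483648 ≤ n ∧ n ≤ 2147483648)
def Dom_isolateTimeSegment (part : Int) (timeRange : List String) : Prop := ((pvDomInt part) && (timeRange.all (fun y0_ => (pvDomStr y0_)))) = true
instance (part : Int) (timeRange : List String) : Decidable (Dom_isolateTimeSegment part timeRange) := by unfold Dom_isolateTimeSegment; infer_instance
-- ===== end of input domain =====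

-- B replaces A's stateful character loop (a flag flipped at the first '-') by partition-at-first-'-'
-- plus one filter of the ignore characters; objective: simpler. Equivalence proved on Pre_ (A's
-- in-range indexing); outside Pre_ both Pythons raise IndexError.

-- ===== PORT A =====
-- one loop step of A: updates (start_time, end_time, end-flag) for one char
def isolateTimeSegmentStep (st : List Char × List Char × Int) (char : Char) :
    List Char × List Char × Int :=
  let en : Int := if char = '-' then 1 else st.2.2
  if char ≠ '>' ∧ char ≠ ' ' ∧ char ≠ '-' then
    if en = 0 then (st.1 ++ [char], st.2.1, en) else (st.1, st.2.1 ++ [char], en)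
  else (st.1, st.2.1, en)

def isolateTimeSegment (part : Int) (timeRange : List String) : String :=
  let tRange := if part = 1 then (PySem.List.pyGet? timeRange 0).getD ""
                else (PySem.List.pyGet? timeRange 1).getD ""
  let res := tRange.toList.foldl isolateTimeSegmentStep ([], [], 0)
  if part = 1 then String.mk res.1 else String.mk res.2.1

-- ===== PORT B =====
def isolateTimeSegment_alt (part : Int) (timeRange : List String) : String :=
  let tRange := if part = 1 then (PySem.List.pyGet? timeRange 0).getD ""
                else (PySem.List.pyGet? timeRange 1).getD ""
  let cs := tRange.toList
  -- tRange.partition('-'): before / after the first '-'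
  let before := cs.takeWhile (· ≠ '-')
  let after := (cs.dropWhile (· ≠ '-')).drop 1
  let seg := if part = 1 then before else after
  String.mk (seg.filter (fun c => c ∉ ['>', '-', ' ']))

-- ===== PRECONDITION & SPEC =====
-- Pre_ excludes exactly the inputs where A's list indexing raises IndexError.
def Pre_isolateTimeSegment (part : Int) (timeRange : List String) : Prop :=
  if part = 1 then timeRange ≠ [] else 2 ≤ timeRange.length
instance (part : Int) (timeRange : List String) : Decidable (Pre_isolateTimeSegment part timeRange) := by
  unfold Pre_isolateTimeSegment; infer_instance
def pvWitness_isolateTimeSegment : Int × List String := (2, ["9:00 -> 10:00", "9:00 -> 10:00"])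
def Spec_isolateTimeSegment (part : Int) (timeRange : List String) (out : String) : Prop := out = isolateTimeSegment_alt part timeRange
instance (part : Int) (timeRange : List String) (out : String) : Decidable (Spec_isolateTimeSegment part timeRange out) := by unfold Spec_isolateTimeSegment; infer_instance

-- ===== CLAIM (what is proved, stated in full; the proofs are below) =====
def Claim_equal_isolateTimeSegment : Prop := ∀ (part : Int) (timeRange : List String), Dom_isolateTimeSegment part timeRange → Pre_isolateTimeSegment part timeRange → Spec_isolateTimeSegment part timeRange (isolateTimeSegment part timeRange)

-- ===== LEMMAS AND PROOFS =====


-- once the flag is 1, everything (non-ignored) goes to end_time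
lemma pvLoop_one (cs : List Char) (s e : List Char) :
    cs.foldl isolateTimeSegmentStep (s, e, 1) =
      (s, e ++ cs.filter (fun c => decide (c ≠ '>' ∧ c ≠ ' ' ∧ c ≠ '-')), 1) := by
  induction cs generalizing e with
  | nil => simp
  | cons c cs ih =>
    by_cases hc : c = '-'
    · simp [List.foldl_cons, isolateTimeSegmentStep, hc, ih]
    · by_cases hk : c ≠ '>' ∧ c ≠ ' ' ∧ c ≠ '-'
      · simp [List.foldl_cons, isolateTimeSegmentStep, hc, hk, ih,
              List.filter_cons]
      · have hne : ¬(¬c = '>' ∧ ¬c = ' ') := by tauto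
        simp [List.foldl_cons, isolateTimeSegmentStep, hc, hne, ih, List.filter_cons]

-- with the flag 0, start gets the filtered take-while, end the filtered tail after the first '-'
lemma pvLoop_zero (cs : List Char) (s e : List Char) :
    cs.foldl isolateTimeSegmentStep (s, e, 0) =
      (s ++ (cs.takeWhile (· ≠ '-')).filter (fun c => decide (c ≠ '>' ∧ c ≠ ' ' ∧ c ≠ '-')),
       e ++ ((cs.dropWhile (· ≠ '-')).drop 1).filter (fun c => decide (c ≠ '>' ∧ c ≠ ' ' ∧ c ≠ '-')),
       if cs.dropWhile (· ≠ '-') = [] then (0 : Int) else 1) := by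
  induction cs generalizing s e with
  | nil => simp
  | cons c cs ih =>
    by_cases hc : c = '-'
    · simp [List.foldl_cons, isolateTimeSegmentStep, hc, pvLoop_one,
            List.takeWhile_cons, List.dropWhile_cons]
    · by_cases hk : c ≠ '>' ∧ c ≠ ' ' ∧ c ≠ '-'
      · simp [List.foldl_cons, isolateTimeSegmentStep, hc, hk, ih,
              List.takeWhile_cons, List.dropWhile_cons, List.filter_cons]
      · have hne : ¬(¬c = '>' ∧ ¬c = ' ') := by tauto
        simp [List.foldl_cons, isolateTimeSegmentStep, hc, hne, ih,
              List.takeWhile_cons, List.dropWhile_cons, List.filter_cons,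
              List.dropWhile_eq_nil_iff]

-- ===== VERDICT (by name: the statement is the Claim_ definition above) =====
theorem isolateTimeSegment_spec : Claim_equal_isolateTimeSegment := by
  intro part timeRange _ _
  unfold Spec_isolateTimeSegment isolateTimeSegment isolateTimeSegment_alt
  by_cases hp : part = 1 <;>
    simp [hp, pvLoop_zero] <;>
    · congr 1
      apply List.filter_congr
      intro c _
      by_cases h1 : c = '>' <;> by_cases h2 : c = ' ' <;> by_cases h3 : c = '-' <;>
        simp [h1, h2, h3]
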